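-- pv_equiv track=rewrite | github.com/wikk-chy/U-FISH | ufish/utils/misc.py | infer_img_axes
-- ===== SOURCE A (Python) =====
-- def infer_img_axes(shape: tuple) -> str:
--     """Infer the axes of an image.
--
--     Args:
--         shape: Shape of the image.
--     """
--     if len(shape) == 2:
--         return 'yx'
--     elif len(shape) == 3:
--         min_dim_idx = shape.index(min(shape))
--         low_dim_shape = list(shape)
--         low_dim_shape.pop(min_dim_idx)
--         low_dim_axes = infer_img_axes(tuple(low_dim_shape))
--         return low_dim_axes[:min_dim_idx] + 'z' + low_dim_axes[min_dim_idx:]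
--     elif len(shape) == 4:
--         min_dim_idx = shape.index(min(shape))
--         low_dim_shape = list(shape)
--         low_dim_shape.pop(min_dim_idx)
--         low_dim_axes = infer_img_axes(tuple(low_dim_shape))
--         return low_dim_axes[:min_dim_idx] + 'c' + low_dim_axes[min_dim_idx:]
--     elif len(shape) == 5:
--         low_dim_shape = infer_img_axes(shape[1:])
--         return 't' + low_dim_shape
--     else:
--         raise ValueError(
--             f'Image shape {shape} is not supported. ')
-- ===== SOURCE B (Python) =====
-- def infer_img_axes(shape: tuple) -> str:
--     n = len(shape)
--     if n not in (2, 3, 4, 5):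
--         raise ValueError(f'Image shape {shape} is not supported. ')
--     idxs = list(range(n))
--     dims = list(shape)
--     labels = [''] * n
--     if n == 5:
--         labels[0] = 't'
--         idxs.pop(0)
--         dims.pop(0)
--     while len(dims) > 2:
--         lab = 'c' if len(dims) == 4 else 'z'
--         i = dims.index(min(dims))
--         labels[idxs[i]] = lab
--         idxs.pop(i)
--         dims.pop(i)
--     labels[idxs[0]] = 'y'
--     labels[idxs[1]] = 'x'
--     return ''.join(labels)
-- ===== Notes on version B (the rewrite author's own statement) =====
-- stated objective: alternative
-- what changed: Replaced A's recursive insert-label-into-substring algorithm (recompute min, pop, recurse, splice the label into the returned string) by a single iterative selection loop over parallel index/dim lists that writes labels into a fixed-size slot array and joins it once.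
import Mathlib
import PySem

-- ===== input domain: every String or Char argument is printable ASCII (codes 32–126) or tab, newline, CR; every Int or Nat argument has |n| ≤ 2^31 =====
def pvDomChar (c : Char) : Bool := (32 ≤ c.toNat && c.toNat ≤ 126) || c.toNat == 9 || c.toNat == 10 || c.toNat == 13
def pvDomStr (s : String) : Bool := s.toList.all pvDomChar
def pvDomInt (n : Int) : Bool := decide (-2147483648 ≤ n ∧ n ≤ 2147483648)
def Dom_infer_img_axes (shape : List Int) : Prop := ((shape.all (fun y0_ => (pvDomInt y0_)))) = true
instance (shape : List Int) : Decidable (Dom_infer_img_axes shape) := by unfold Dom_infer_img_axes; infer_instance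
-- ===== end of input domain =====

-- B replaces A's recursive splice-the-label-into-a-substring algorithm by one iterative
-- selection loop over parallel index/dim lists writing into a fixed slot array (alternative
-- decomposition, same cost).

-- ===== PORT A =====
-- Recursion guarded by fuel := shape.length, which always suffices (each recursive call
-- shortens the list by one or four); the fuel-0 branch is unreachable on Pre_.
def inferGoA (fuel : Nat) (shape : List Int) : String :=
  match fuel with
  | 0 => ""          -- fuel guard only, never reached with fuel = shape.length
  | f+1 =>
    if shape.length = 2 then "yx"
    else if shape.length = 3 then
      match PySem.List.min? shape (fun x => x) with    -- min(shape)
      | none => ""                                     -- unreachable: shape ≠ []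
      | some m =>
        match PySem.List.index? shape m with           -- shape.index(min(shape))
        | none => ""                                   -- unreachable: m ∈ shape
        | some i =>
          -- low_dim_shape.pop(min_dim_idx); i is in range, so pop = eraseIdx
          let lowAxes := (inferGoA f (shape.eraseIdx i)).toList
          -- low_dim_axes[:i] + 'z' + low_dim_axes[i:]  (i : Nat, so take/drop are exact)
          String.ofList (lowAxes.take i ++ 'z' :: lowAxes.drop i)
    else if shape.length = 4 then
      match PySem.List.min? shape (fun x => x) with
      | none => ""
      | some m =>
        match PySem.List.index? shape m with
        | none => ""
        | some i =>
          let lowAxes := (inferGoA f (shape.eraseIdx i)).toList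
          String.ofList (lowAxes.take i ++ 'c' :: lowAxes.drop i)
    else if shape.length = 5 then
      -- 't' + infer_img_axes(shape[1:])
      String.ofList ('t' :: (inferGoA f (shape.drop 1)).toList)
    else ""          -- Python raises ValueError here; excluded by Pre_

def infer_img_axes (shape : List Int) : String := inferGoA shape.length shape

-- ===== PORT B =====
-- Labels are 1-char Python strings, represented as List Char ('' = []); fuel := dims.length
-- bounds the while-loop (each iteration pops one element), so the fuel-0 branch is unreachable.
def altLoop (fuel : Nat) (idxs : List Nat) (dims : List Int)
    (labels : List (List Char)) : List (List Char) × List Nat :=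
  match fuel with
  | 0 => (labels, idxs)   -- fuel guard only
  | f+1 =>
    if dims.length > 2 then
      let lab : Char := if dims.length = 4 then 'c' else 'z'
      match PySem.List.min? dims (fun x => x) with     -- min(dims)
      | none => (labels, idxs)                         -- unreachable: dims ≠ []
      | some m =>
        match PySem.List.index? dims m with            -- dims.index(min(dims))
        | none => (labels, idxs)                       -- unreachable: m ∈ dims
        | some i =>
          -- labels[idxs[i]] = lab; idxs.pop(i); dims.pop(i)   (i in range: pop = eraseIdx)
          altLoop f (idxs.eraseIdx i) (dims.eraseIdx i) (labels.set (idxs.getD i 0) [lab])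
    else (labels, idxs)

def infer_img_axes_alt (shape : List Int) : String :=
  let n := shape.length
  if n = 2 ∨ n = 3 ∨ n = 4 ∨ n = 5 then
    let idxs0 := List.range n
    let labels0 := List.replicate n ([] : List Char)
    let s1 :=                     -- the n == 5 pre-step: label slot 0 't', drop entry 0
      if n = 5 then (labels0.set 0 ['t'], idxs0.eraseIdx 0, shape.eraseIdx 0)
      else (labels0, idxs0, shape)
    let r := altLoop s1.2.2.length s1.2.1 s1.2.2 s1.1
    -- labels[idxs[0]] = 'y'; labels[idxs[1]] = 'x'; ''.join(labels)
    let labels3 := (r.1.set (r.2.getD 0 0) ['y']).set (r.2.getD 1 0) ['x']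
    String.ofList labels3.flatten
  else ""                         -- Python raises ValueError here; excluded by Pre_

-- ===== PRECONDITION & SPEC =====
-- Pre_ excludes exactly the shapes of length ∉ {2,3,4,5}, on which A raises ValueError.
def Pre_infer_img_axes (shape : List Int) : Prop :=
  shape.length = 2 ∨ shape.length = 3 ∨ shape.length = 4 ∨ shape.length = 5
instance (shape : List Int) : Decidable (Pre_infer_img_axes shape) := by
  unfold Pre_infer_img_axes; infer_instance
def pvWitness_infer_img_axes : List Int := ([3, 100, 200])

def Spec_infer_img_axes (shape : List Int) (out : String) : Prop := out = infer_img_axes_alt shape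
instance (shape : List Int) (out : String) : Decidable (Spec_infer_img_axes shape out) := by
  unfold Spec_infer_img_axes; infer_instance

-- ===== CLAIM (what is proved, stated in full; the proofs are below) =====
def Claim_equal_infer_img_axes : Prop := ∀ (shape : List Int), Dom_infer_img_axes shape → Pre_infer_img_axes shape → Spec_infer_img_axes shape (infer_img_axes shape)

-- ===== LEMMAS AND PROOFS =====

theorem pv_eq2 (a b : Int) : infer_img_axes [a,b] = infer_img_axes_alt [a,b] := by
  simp [infer_img_axes, infer_img_axes_alt, inferGoA, altLoop]

theorem pv_eq3 (a b c : Int) : infer_img_axes [a,b,c] = infer_img_axes_alt [a,b,c] := by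
  by_cases hp_a_b_c_0 : a ≤ b ∧ a ≤ c
  · have m1 : PySem.List.min? [a,b,c] (fun x => x) = some a := by
      rw [PySem.List.min?_id_cons]; simp only [List.foldl]; congr 1; omega
    have i1 : List.idxOf? a [a,b,c] = some 0 := by
      simp [List.idxOf?, List.findIdx?, List.findIdx?.go, beq_iff_eq]
    simp [infer_img_axes, infer_img_axes_alt, inferGoA, altLoop, m1, i1] <;> decide
  by_cases hp_a_b_c_1 : b < a ∧ b ≤ c
  · have m1 : PySem.List.min? [a,b,c] (fun x => x) = some b := by
      rw [PySem.List.min?_id_cons]; simp only [List.foldl]; congr 1; omega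
    have i1 : List.idxOf? b [a,b,c] = some 1 := by
      simp [List.idxOf?, List.findIdx?, List.findIdx?.go, beq_iff_eq, (show a ≠ b by omega)]
    simp [infer_img_axes, infer_img_axes_alt, inferGoA, altLoop, m1, i1] <;> decide
  · have m1 : PySem.List.min? [a,b,c] (fun x => x) = some c := by
      rw [PySem.List.min?_id_cons]; simp only [List.foldl]; congr 1; omega
    have i1 : List.idxOf? c [a,b,c] = some 2 := by
      simp [List.idxOf?, List.findIdx?, List.findIdx?.go, beq_iff_eq, (show a ≠ c by omega), (show b ≠ c by omega)]
    simp [infer_img_axes, infer_img_axes_alt, inferGoA, altLoop, m1, i1] <;> decide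

theorem pv_eq4 (a b c d : Int) : infer_img_axes [a,b,c,d] = infer_img_axes_alt [a,b,c,d] := by
  by_cases hp_a_b_c_d_0 : a ≤ b ∧ a ≤ c ∧ a ≤ d
  · have m1 : PySem.List.min? [a,b,c,d] (fun x => x) = some a := by
      rw [PySem.List.min?_id_cons]; simp only [List.foldl]; congr 1; omega
    have i1 : List.idxOf? a [a,b,c,d] = some 0 := by
      simp [List.idxOf?, List.findIdx?, List.findIdx?.go, beq_iff_eq]
    by_cases hp_b_c_d_0 : b ≤ c ∧ b ≤ d
    · have m2 : PySem.List.min? [b,c,d] (fun x => x) = some b := by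
        rw [PySem.List.min?_id_cons]; simp only [List.foldl]; congr 1; omega
      have i2 : List.idxOf? b [b,c,d] = some 0 := by
        simp [List.idxOf?, List.findIdx?, List.findIdx?.go, beq_iff_eq]
      simp [infer_img_axes, infer_img_axes_alt, inferGoA, altLoop, m1, i1, m2, i2] <;> decide
    by_cases hp_b_c_d_1 : c < b ∧ c ≤ d
    · have m2 : PySem.List.min? [b,c,d] (fun x => x) = some c := by
        rw [PySem.List.min?_id_cons]; simp only [List.foldl]; congr 1; omega
      have i2 : List.idxOf? c [b,c,d] = some 1 := by
        simp [List.idxOf?, List.findIdx?, List.findIdx?.go, beq_iff_eq, (show b ≠ c by omega)]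
      simp [infer_img_axes, infer_img_axes_alt, inferGoA, altLoop, m1, i1, m2, i2] <;> decide
    · have m2 : PySem.List.min? [b,c,d] (fun x => x) = some d := by
        rw [PySem.List.min?_id_cons]; simp only [List.foldl]; congr 1; omega
      have i2 : List.idxOf? d [b,c,d] = some 2 := by
        simp [List.idxOf?, List.findIdx?, List.findIdx?.go, beq_iff_eq, (show b ≠ d by omega), (show c ≠ d by omega)]
      simp [infer_img_axes, infer_img_axes_alt, inferGoA, altLoop, m1, i1, m2, i2] <;> decide
  by_cases hp_a_b_c_d_1 : b < a ∧ b ≤ c ∧ b ≤ d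
  · have m1 : PySem.List.min? [a,b,c,d] (fun x => x) = some b := by
      rw [PySem.List.min?_id_cons]; simp only [List.foldl]; congr 1; omega
    have i1 : List.idxOf? b [a,b,c,d] = some 1 := by
      simp [List.idxOf?, List.findIdx?, List.findIdx?.go, beq_iff_eq, (show a ≠ b by omega)]
    by_cases hp_a_c_d_0 : a ≤ c ∧ a ≤ d
    · have m2 : PySem.List.min? [a,c,d] (fun x => x) = some a := by
        rw [PySem.List.min?_id_cons]; simp only [List.foldl]; congr 1; omega
      have i2 : List.idxOf? a [a,c,d] = some 0 := by
        simp [List.idxOf?, List.findIdx?, List.findIdx?.go, beq_iff_eq]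
      simp [infer_img_axes, infer_img_axes_alt, inferGoA, altLoop, m1, i1, m2, i2] <;> decide
    by_cases hp_a_c_d_1 : c < a ∧ c ≤ d
    · have m2 : PySem.List.min? [a,c,d] (fun x => x) = some c := by
        rw [PySem.List.min?_id_cons]; simp only [List.foldl]; congr 1; omega
      have i2 : List.idxOf? c [a,c,d] = some 1 := by
        simp [List.idxOf?, List.findIdx?, List.findIdx?.go, beq_iff_eq, (show a ≠ c by omega)]
      simp [infer_img_axes, infer_img_axes_alt, inferGoA, altLoop, m1, i1, m2, i2] <;> decide
    · have m2 : PySem.List.min? [a,c,d] (fun x => x) = some d := by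
        rw [PySem.List.min?_id_cons]; simp only [List.foldl]; congr 1; omega
      have i2 : List.idxOf? d [a,c,d] = some 2 := by
        simp [List.idxOf?, List.findIdx?, List.findIdx?.go, beq_iff_eq, (show a ≠ d by omega), (show c ≠ d by omega)]
      simp [infer_img_axes, infer_img_axes_alt, inferGoA, altLoop, m1, i1, m2, i2] <;> decide
  by_cases hp_a_b_c_d_2 : c < a ∧ c < b ∧ c ≤ d
  · have m1 : PySem.List.min? [a,b,c,d] (fun x => x) = some c := by
      rw [PySem.List.min?_id_cons]; simp only [List.foldl]; congr 1; omega
    have i1 : List.idxOf? c [a,b,c,d] = some 2 := by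
      simp [List.idxOf?, List.findIdx?, List.findIdx?.go, beq_iff_eq, (show a ≠ c by omega), (show b ≠ c by omega)]
    by_cases hp_a_b_d_0 : a ≤ b ∧ a ≤ d
    · have m2 : PySem.List.min? [a,b,d] (fun x => x) = some a := by
        rw [PySem.List.min?_id_cons]; simp only [List.foldl]; congr 1; omega
      have i2 : List.idxOf? a [a,b,d] = some 0 := by
        simp [List.idxOf?, List.findIdx?, List.findIdx?.go, beq_iff_eq]
      simp [infer_img_axes, infer_img_axes_alt, inferGoA, altLoop, m1, i1, m2, i2] <;> decide
    by_cases hp_a_b_d_1 : b < a ∧ b ≤ d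
    · have m2 : PySem.List.min? [a,b,d] (fun x => x) = some b := by
        rw [PySem.List.min?_id_cons]; simp only [List.foldl]; congr 1; omega
      have i2 : List.idxOf? b [a,b,d] = some 1 := by
        simp [List.idxOf?, List.findIdx?, List.findIdx?.go, beq_iff_eq, (show a ≠ b by omega)]
      simp [infer_img_axes, infer_img_axes_alt, inferGoA, altLoop, m1, i1, m2, i2] <;> decide
    · have m2 : PySem.List.min? [a,b,d] (fun x => x) = some d := by
        rw [PySem.List.min?_id_cons]; simp only [List.foldl]; congr 1; omega
      have i2 : List.idxOf? d [a,b,d] = some 2 := by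
        simp [List.idxOf?, List.findIdx?, List.findIdx?.go, beq_iff_eq, (show a ≠ d by omega), (show b ≠ d by omega)]
      simp [infer_img_axes, infer_img_axes_alt, inferGoA, altLoop, m1, i1, m2, i2] <;> decide
  · have m1 : PySem.List.min? [a,b,c,d] (fun x => x) = some d := by
      rw [PySem.List.min?_id_cons]; simp only [List.foldl]; congr 1; omega
    have i1 : List.idxOf? d [a,b,c,d] = some 3 := by
      simp [List.idxOf?, List.findIdx?, List.findIdx?.go, beq_iff_eq, (show a ≠ d by omega), (show b ≠ d by omega), (show c ≠ d by omega)]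
    by_cases hp_a_b_c_0 : a ≤ b ∧ a ≤ c
    · have m2 : PySem.List.min? [a,b,c] (fun x => x) = some a := by
        rw [PySem.List.min?_id_cons]; simp only [List.foldl]; congr 1; omega
      have i2 : List.idxOf? a [a,b,c] = some 0 := by
        simp [List.idxOf?, List.findIdx?, List.findIdx?.go, beq_iff_eq]
      simp [infer_img_axes, infer_img_axes_alt, inferGoA, altLoop, m1, i1, m2, i2] <;> decide
    by_cases hp_a_b_c_1 : b < a ∧ b ≤ c
    · have m2 : PySem.List.min? [a,b,c] (fun x => x) = some b := by
        rw [PySem.List.min?_id_cons]; simp only [List.foldl]; congr 1; omega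
      have i2 : List.idxOf? b [a,b,c] = some 1 := by
        simp [List.idxOf?, List.findIdx?, List.findIdx?.go, beq_iff_eq, (show a ≠ b by omega)]
      simp [infer_img_axes, infer_img_axes_alt, inferGoA, altLoop, m1, i1, m2, i2] <;> decide
    · have m2 : PySem.List.min? [a,b,c] (fun x => x) = some c := by
        rw [PySem.List.min?_id_cons]; simp only [List.foldl]; congr 1; omega
      have i2 : List.idxOf? c [a,b,c] = some 2 := by
        simp [List.idxOf?, List.findIdx?, List.findIdx?.go, beq_iff_eq, (show a ≠ c by omega), (show b ≠ c by omega)]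
      simp [infer_img_axes, infer_img_axes_alt, inferGoA, altLoop, m1, i1, m2, i2] <;> decide

theorem pv_eq5 (a b c d e : Int) : infer_img_axes [a,b,c,d,e] = infer_img_axes_alt [a,b,c,d,e] := by
  by_cases hp_b_c_d_e_0 : b ≤ c ∧ b ≤ d ∧ b ≤ e
  · have m1 : PySem.List.min? [b,c,d,e] (fun x => x) = some b := by
      rw [PySem.List.min?_id_cons]; simp only [List.foldl]; congr 1; omega
    have i1 : List.idxOf? b [b,c,d,e] = some 0 := by
      simp [List.idxOf?, List.findIdx?, List.findIdx?.go, beq_iff_eq]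
    by_cases hp_c_d_e_0 : c ≤ d ∧ c ≤ e
    · have m2 : PySem.List.min? [c,d,e] (fun x => x) = some c := by
        rw [PySem.List.min?_id_cons]; simp only [List.foldl]; congr 1; omega
      have i2 : List.idxOf? c [c,d,e] = some 0 := by
        simp [List.idxOf?, List.findIdx?, List.findIdx?.go, beq_iff_eq]
      simp [infer_img_axes, infer_img_axes_alt, inferGoA, altLoop, m1, i1, m2, i2] <;> decide
    by_cases hp_c_d_e_1 : d < c ∧ d ≤ e
    · have m2 : PySem.List.min? [c,d,e] (fun x => x) = some d := by
        rw [PySem.List.min?_id_cons]; simp only [List.foldl]; congr 1; omega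
      have i2 : List.idxOf? d [c,d,e] = some 1 := by
        simp [List.idxOf?, List.findIdx?, List.findIdx?.go, beq_iff_eq, (show c ≠ d by omega)]
      simp [infer_img_axes, infer_img_axes_alt, inferGoA, altLoop, m1, i1, m2, i2] <;> decide
    · have m2 : PySem.List.min? [c,d,e] (fun x => x) = some e := by
        rw [PySem.List.min?_id_cons]; simp only [List.foldl]; congr 1; omega
      have i2 : List.idxOf? e [c,d,e] = some 2 := by
        simp [List.idxOf?, List.findIdx?, List.findIdx?.go, beq_iff_eq, (show c ≠ e by omega), (show d ≠ e by omega)]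
      simp [infer_img_axes, infer_img_axes_alt, inferGoA, altLoop, m1, i1, m2, i2] <;> decide
  by_cases hp_b_c_d_e_1 : c < b ∧ c ≤ d ∧ c ≤ e
  · have m1 : PySem.List.min? [b,c,d,e] (fun x => x) = some c := by
      rw [PySem.List.min?_id_cons]; simp only [List.foldl]; congr 1; omega
    have i1 : List.idxOf? c [b,c,d,e] = some 1 := by
      simp [List.idxOf?, List.findIdx?, List.findIdx?.go, beq_iff_eq, (show b ≠ c by omega)]
    by_cases hp_b_d_e_0 : b ≤ d ∧ b ≤ e
    · have m2 : PySem.List.min? [b,d,e] (fun x => x) = some b := by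
        rw [PySem.List.min?_id_cons]; simp only [List.foldl]; congr 1; omega
      have i2 : List.idxOf? b [b,d,e] = some 0 := by
        simp [List.idxOf?, List.findIdx?, List.findIdx?.go, beq_iff_eq]
      simp [infer_img_axes, infer_img_axes_alt, inferGoA, altLoop, m1, i1, m2, i2] <;> decide
    by_cases hp_b_d_e_1 : d < b ∧ d ≤ e
    · have m2 : PySem.List.min? [b,d,e] (fun x => x) = some d := by
        rw [PySem.List.min?_id_cons]; simp only [List.foldl]; congr 1; omega
      have i2 : List.idxOf? d [b,d,e] = some 1 := by
        simp [List.idxOf?, List.findIdx?, List.findIdx?.go, beq_iff_eq, (show b ≠ d by omega)]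
      simp [infer_img_axes, infer_img_axes_alt, inferGoA, altLoop, m1, i1, m2, i2] <;> decide
    · have m2 : PySem.List.min? [b,d,e] (fun x => x) = some e := by
        rw [PySem.List.min?_id_cons]; simp only [List.foldl]; congr 1; omega
      have i2 : List.idxOf? e [b,d,e] = some 2 := by
        simp [List.idxOf?, List.findIdx?, List.findIdx?.go, beq_iff_eq, (show b ≠ e by omega), (show d ≠ e by omega)]
      simp [infer_img_axes, infer_img_axes_alt, inferGoA, altLoop, m1, i1, m2, i2] <;> decide
  by_cases hp_b_c_d_e_2 : d < b ∧ d < c ∧ d ≤ e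
  · have m1 : PySem.List.min? [b,c,d,e] (fun x => x) = some d := by
      rw [PySem.List.min?_id_cons]; simp only [List.foldl]; congr 1; omega
    have i1 : List.idxOf? d [b,c,d,e] = some 2 := by
      simp [List.idxOf?, List.findIdx?, List.findIdx?.go, beq_iff_eq, (show b ≠ d by omega), (show c ≠ d by omega)]
    by_cases hp_b_c_e_0 : b ≤ c ∧ b ≤ e
    · have m2 : PySem.List.min? [b,c,e] (fun x => x) = some b := by
        rw [PySem.List.min?_id_cons]; simp only [List.foldl]; congr 1; omega
      have i2 : List.idxOf? b [b,c,e] = some 0 := by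
        simp [List.idxOf?, List.findIdx?, List.findIdx?.go, beq_iff_eq]
      simp [infer_img_axes, infer_img_axes_alt, inferGoA, altLoop, m1, i1, m2, i2] <;> decide
    by_cases hp_b_c_e_1 : c < b ∧ c ≤ e
    · have m2 : PySem.List.min? [b,c,e] (fun x => x) = some c := by
        rw [PySem.List.min?_id_cons]; simp only [List.foldl]; congr 1; omega
      have i2 : List.idxOf? c [b,c,e] = some 1 := by
        simp [List.idxOf?, List.findIdx?, List.findIdx?.go, beq_iff_eq, (show b ≠ c by omega)]
      simp [infer_img_axes, infer_img_axes_alt, inferGoA, altLoop, m1, i1, m2, i2] <;> decide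
    · have m2 : PySem.List.min? [b,c,e] (fun x => x) = some e := by
        rw [PySem.List.min?_id_cons]; simp only [List.foldl]; congr 1; omega
      have i2 : List.idxOf? e [b,c,e] = some 2 := by
        simp [List.idxOf?, List.findIdx?, List.findIdx?.go, beq_iff_eq, (show b ≠ e by omega), (show c ≠ e by omega)]
      simp [infer_img_axes, infer_img_axes_alt, inferGoA, altLoop, m1, i1, m2, i2] <;> decide
  · have m1 : PySem.List.min? [b,c,d,e] (fun x => x) = some e := by
      rw [PySem.List.min?_id_cons]; simp only [List.foldl]; congr 1; omega
    have i1 : List.idxOf? e [b,c,d,e] = some 3 := by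
      simp [List.idxOf?, List.findIdx?, List.findIdx?.go, beq_iff_eq, (show b ≠ e by omega), (show c ≠ e by omega), (show d ≠ e by omega)]
    by_cases hp_b_c_d_0 : b ≤ c ∧ b ≤ d
    · have m2 : PySem.List.min? [b,c,d] (fun x => x) = some b := by
        rw [PySem.List.min?_id_cons]; simp only [List.foldl]; congr 1; omega
      have i2 : List.idxOf? b [b,c,d] = some 0 := by
        simp [List.idxOf?, List.findIdx?, List.findIdx?.go, beq_iff_eq]
      simp [infer_img_axes, infer_img_axes_alt, inferGoA, altLoop, m1, i1, m2, i2] <;> decide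
    by_cases hp_b_c_d_1 : c < b ∧ c ≤ d
    · have m2 : PySem.List.min? [b,c,d] (fun x => x) = some c := by
        rw [PySem.List.min?_id_cons]; simp only [List.foldl]; congr 1; omega
      have i2 : List.idxOf? c [b,c,d] = some 1 := by
        simp [List.idxOf?, List.findIdx?, List.findIdx?.go, beq_iff_eq, (show b ≠ c by omega)]
      simp [infer_img_axes, infer_img_axes_alt, inferGoA, altLoop, m1, i1, m2, i2] <;> decide
    · have m2 : PySem.List.min? [b,c,d] (fun x => x) = some d := by
        rw [PySem.List.min?_id_cons]; simp only [List.foldl]; congr 1; omega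
      have i2 : List.idxOf? d [b,c,d] = some 2 := by
        simp [List.idxOf?, List.findIdx?, List.findIdx?.go, beq_iff_eq, (show b ≠ d by omega), (show c ≠ d by omega)]
      simp [infer_img_axes, infer_img_axes_alt, inferGoA, altLoop, m1, i1, m2, i2] <;> decide

-- ===== VERDICT (by name: the statement is the Claim_ definition above) =====
theorem infer_img_axes_spec : Claim_equal_infer_img_axes := by
  intro shape _ hpre
  show infer_img_axes shape = infer_img_axes_alt shape
  rcases shape with _ | ⟨a, _ | ⟨b, _ | ⟨c, _ | ⟨d, _ | ⟨e, _ | ⟨f, rest⟩⟩⟩⟩⟩⟩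
  · simp [Pre_infer_img_axes] at hpre
  · simp [Pre_infer_img_axes] at hpre
  · exact pv_eq2 a b
  · exact pv_eq3 a b c
  · exact pv_eq4 a b c d
  · exact pv_eq5 a b c d e
  · simp [Pre_infer_img_axes] at hpre
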